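-- pv_equiv track=rewrite | github.com/dcl5255/Codility-Lessons | Lessons/7-Stacks and Queues/StoneWall.py | block_found
-- ===== SOURCE A (Python) =====
-- from collections import deque
--
-- def add_to_blocks(blocks, new_blocks):
--     while new_blocks:
--         blocks.append(new_blocks.pop())
--
-- def block_found(blocks, current):
--     removed = deque()
--
--     while blocks:
--         last_block = blocks.pop()
--         removed.append(last_block)
--         if current == last_block:
--             add_to_blocks(blocks, removed)
--             return True
--         if current < last_block:
--             continue
--         if current > last_block:
--             add_to_blocks(blocks, removed)
--             return False
--     return False
-- ===== SOURCE B (Python) =====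
-- def block_found(blocks, current):
--     # Read the stack in place from the top instead of popping into a deque
--     # and restoring. Mutation: like A, the stack is left unchanged except in
--     # the exhaustion case, where A leaves it emptied; we replicate with clear().
--     for b in reversed(blocks):
--         if b == current:
--             return True
--         if b < current:
--             return False
--     blocks.clear()
--     return False
-- ===== Notes on version B (the rewrite author's own statement) =====
-- stated objective: simpler
-- what changed: B reads the stack in place from the top with a single reversed scan (equal -> True, smaller -> False, larger -> keep scanning), dropping A's temporary deque and the pop/restore helper; only the exhaustion case still empties the stack, matching A's mutation.
import Mathlib
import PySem

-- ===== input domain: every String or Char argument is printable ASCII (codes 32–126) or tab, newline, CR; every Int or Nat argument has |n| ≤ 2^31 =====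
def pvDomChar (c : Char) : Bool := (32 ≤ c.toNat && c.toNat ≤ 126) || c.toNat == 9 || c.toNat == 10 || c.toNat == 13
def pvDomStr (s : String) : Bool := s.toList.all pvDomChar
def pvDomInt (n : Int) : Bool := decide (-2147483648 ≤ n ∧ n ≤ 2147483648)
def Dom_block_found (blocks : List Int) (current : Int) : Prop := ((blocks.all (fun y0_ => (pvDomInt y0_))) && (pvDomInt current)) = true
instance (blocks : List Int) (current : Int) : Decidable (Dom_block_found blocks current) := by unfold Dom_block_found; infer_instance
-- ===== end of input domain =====

-- B replaces A's pop-into-deque-and-restore stack walk by a single in-place scan of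
-- the stack from the top (simpler, same cost); equivalence is about the RETURN value
-- only — both Pythons mutate `blocks` identically (emptied iff the scan exhausts it).


-- ===== PORT A =====
-- Python lists used as stacks: top of stack = END of the list (pop = getLast, push = append).
-- add_to_blocks(blocks, new_blocks): while new_blocks: blocks.append(new_blocks.pop())
def addToBlocksA (blocks newBlocks : List Int) : List Int :=
  if h : newBlocks = [] then blocks
  else addToBlocksA (blocks ++ [newBlocks.getLast h]) newBlocks.dropLast
termination_by newBlocks.length
decreasing_by
  simp [List.length_dropLast]
  exact List.length_pos_iff.mpr h

-- the `while blocks:` loop of A, carrying the `removed` deque (append = right end)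
def blockFoundLoopA (blocks removed : List Int) (current : Int) : Bool :=
  if h : blocks = [] then false
  else
    let last_block := blocks.getLast h
    let blocks' := blocks.dropLast
    let removed' := removed ++ [last_block]
    if current == last_block then
      -- add_to_blocks(blocks, removed); return True  (restore does not affect the return value)
      let _ := addToBlocksA blocks' removed'
      true
    else if current < last_block then
      blockFoundLoopA blocks' removed' current
    else
      -- current > last_block: add_to_blocks(blocks, removed); return False
      let _ := addToBlocksA blocks' removed'
      false
termination_by blocks.length
decreasing_by
  simp [List.length_dropLast]
  exact List.length_pos_iff.mpr h

def block_found (blocks : List Int) (current : Int) : Bool :=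
  blockFoundLoopA blocks [] current

-- ===== PORT B =====
-- `for b in reversed(blocks): …` — structural recursion over the reversed list.
def scanRevB (bs : List Int) (current : Int) : Bool :=
  match bs with
  | [] => false
  | b :: rest =>
    if b == current then true
    else if b < current then false
    else scanRevB rest current

def block_found_alt (blocks : List Int) (current : Int) : Bool :=
  scanRevB blocks.reverse current

-- ===== PRECONDITION & SPEC =====
def Spec_block_found (blocks : List Int) (current : Int) (out : Bool) : Prop := out = block_found_alt blocks current
instance (blocks : List Int) (current : Int) (out : Bool) : Decidable (Spec_block_found blocks current out) := by unfold Spec_block_found; infer_instance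

-- ===== CLAIM (what is proved, stated in full; the proofs are below) =====
def Claim_equal_block_found : Prop := ∀ (blocks : List Int) (current : Int), Dom_block_found blocks current → Spec_block_found blocks current (block_found blocks current)

-- ===== LEMMAS AND PROOFS =====

theorem loopA_eq_scanRev (rs : List Int) (removed : List Int) (current : Int) :
    blockFoundLoopA rs.reverse removed current = scanRevB rs current := by
  induction rs generalizing removed with
  | nil => rw [blockFoundLoopA.eq_def]; simp [scanRevB]
  | cons b rest ih =>
    rw [blockFoundLoopA.eq_def]
    have hne : rest.reverse ++ [b] ≠ [] := by simp
    simp only [List.reverse_cons, dif_neg hne, List.getLast_concat, List.dropLast_concat,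
      scanRevB]
    by_cases h1 : current == b
    · have : b == current := by simpa [eq_comm, BEq.beq] using h1
      simp [h1, this]
    · have hb : (b == current) = false := by
        simpa [eq_comm, BEq.beq] using h1
      by_cases h2 : current < b
      · have : ¬ b < current := by omega
        simp [h1, hb, h2, this, ih]
      · have : b < current := by
          rcases lt_trichotomy current b with h | h | h
        -- current ≠ b from h1
          · exact absurd h h2
          · exact absurd (by simpa [BEq.beq] using h) (by simpa using h1)
          · exact h
        simp [h1, hb, h2, this]

-- ===== VERDICT (by name: the statement is the Claim_ definition above) =====
theorem block_found_spec : Claim_equal_block_found := by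
  intro blocks current _
  unfold Spec_block_found block_found block_found_alt
  calc blockFoundLoopA blocks [] current
      = blockFoundLoopA blocks.reverse.reverse [] current := by rw [List.reverse_reverse]
    _ = scanRevB blocks.reverse current := loopA_eq_scanRev _ _ _
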